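/-
  THE SPLIT OF `vorbis_decode_initial` (159 instructions, 0x113160 … 0x1133d8; stb_vorbis_fixed.c 3152–3205) INTO NINE SEGMENTS.

  The function's contract `Vorbis.Spec.vorbis_decode_initial.spec` is in Vorbis/Spec/Top.lean. This file holds
    PART 1: general lemmas of the family (`di_keep`: `Bits` / μ over stores off the reader's fields; `di_stores_ok`: every window of
            the footprint is a decode-time store; `di_post_ok`: THE POSTCONDITION from what a walk knows at the `ret`; `di_widen`,
            `di_lea6`);
    PART 2: the assertions at the cut points, all relative to the function's entry state `u` (`f` = `(u.reg .rdi).toNat`, the decoder):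
            `IFrame ws` (what every cut point shares: text, footprint `ws` since the entry, no shadow byte, the nine stack slots, DF /
            MXCSR, `Bits`, the two zeroed fields) with its carry lemma `IFrame.carry`;
            `IAt pc` (the heads of the two loops `loop1` = 0x1131b0, `loop2` = 0x1131eb; the exit `at_1131fa` of the retry loop; the
            return `cut7` = 0x11321e of `get_bits(f, ilog(mode_count − 1))`), `IAtM i` (`ret12` = 0x113265: the mode `i` is stored),
            `IAtWin i bf n` (the join `at_113282`: `n` = the block size in r15d), `IAtRight i bf n` (the join `at_113337`: the left half
            of the window is stored), `IAtEnd` (the epilogue `at_1133c3`: the result in eax);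
    PART 3: the claims `Seg1 … Seg9` of the units `vorbis_decode_initial.1 … .9`. The retry loop and the drain loop nested in it are
            ONE ROUND per unit (`Seg2`, `Seg3`); the induction on the bound of the paging measure μ (`Vorbis/Bits.lean`) is the
            composition's (unit `vorbis_decode_initial.COMPOSITION`, farm/worked/vorbis_decode_initial.COMPOSITION).

  The stack frame (steady `rsp` = entry `rsp − 88`: six pushes and `sub rsp, 28H`), offsets from the ENTRY rsp:
    −80 `[rsp+8]` p_right_start (rcx)    −72 `[rsp+10H]` p_right_end (r8)    −64 `[rsp+18H]` window_center    −60 `[rsp+1CH]` next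
    −48 … −8 the saved rbx rbp r12 r13 r14 r15    0 the return address;    −96 the return address of every callee.
  Registers after the prologue: rbx = f, r13 = p_left_start (rsi), r12 = p_left_end (rdx), r14 = mode (r9) until 0x113255, then
  `m = f->mode_config + i`; ebp = `f->eof` (= 0 after the loop), later `prev`; r15d = `i`, later `n`.

  Origin: the farm worker's proof of the unit (work/vorbis_decode_initial.1/Lemmas.lean: structures `At`, `AtM`, `AtEnd`, PROVED from
  the entry to 0x113265 and from 0x1133c3 to the `ret`); `IAtWin`, `IAtRight` are new (the worker's proposal + H-21's block).
-/
import Vorbis.Spec.Top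
import Vorbis.Spec.Reader
import Vorbis.Spec.Leaves2
import Vorbis.LabelsAt

open X86 X86.User Asan Vorbis Vorbis.Spec

namespace Vorbis.Spec.vorbis_decode_initial

/-! ### PART 1. General lemmas -/

/-- Stores off the fields `Bits` and μ read (off `*f`, or `channel_buffer_start / _end`) keep `Bits`, μ and `valid_bits`. -/
theorem di_keep {Blk : Block → Prop} {len : Nat} {mem mem' : Mem} {f : Nat} {ws : List Span}
    (h : Bits Blk len mem f) (hs : Mem.SameExcept ws mem mem')
    (hsub : ∀ w, w ∈ ws → (w.hi ≤ f ∨ f + 1808 ≤ w.lo) ∨ (f + 1796 ≤ w.lo ∧ w.hi ≤ f + 1804)) :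
    Bits Blk len mem' f ∧ mu mem' f = mu mem f ∧ stb_vorbis.valid_bits mem' f = stb_vorbis.valid_bits mem f := by
  have hr := h.OBR
  simp only [voff] at hr
  have hsf : Bits.SameFields mem mem' f := by
    apply Bits.SameFields.of_sameExcept hs
    all_goals
      intro w hw
      have := hsub w hw
      omega
  have hB : Mem.EqOn (f + 1748) (f + 1749) mem mem' := by
    apply hs.eqOn
    intro w hw
    have := hsub w hw
    omega
  have hmu : mu mem' f = mu mem f := Reader.mu_frame_fields (by omega) hsf hB
  refine ⟨h.frame_fields hsf, hmu, ?_⟩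
  simp only [vacc, voff]
  exact hsf.valid_bits.i32 _ (by omega) (by omega) (by omega)

/-- The footprint of the loop phase is part of the footprint with the five out-objects. -/
theorem di_widen {sp f a b c d e : Nat} {m m' : Mem}
    (h : Mem.SameExcept [⟨sp - 448, sp⟩, ⟨f + 48, f + 56⟩, ⟨f + 84, f + 96⟩, ⟨f + 136, f + 144⟩, ⟨f + 1484, f + 1749⟩,
      ⟨f + 1752, f + 1784⟩, ⟨f + 1796, f + 1804⟩] m m') :
    Mem.SameExcept [⟨sp - 448, sp⟩, ⟨f + 48, f + 56⟩, ⟨f + 84, f + 96⟩, ⟨f + 136, f + 144⟩, ⟨f + 1484, f + 1749⟩,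
      ⟨f + 1752, f + 1784⟩, ⟨f + 1796, f + 1804⟩, ⟨a, a + 4⟩, ⟨b, b + 4⟩, ⟨c, c + 4⟩, ⟨d, d + 4⟩, ⟨e, e + 4⟩] m m' := by
  refine h.mono ?_
  intro w hw x h1 h2
  refine ⟨w, ?_, h1, h2⟩
  simp only [List.mem_cons, List.not_mem_nil, or_false] at hw ⊢
  rcases hw with rfl | rfl | rfl | rfl | rfl | rfl | rfl <;> simp only [true_or, or_true]

/-- Every window of the function's footprint is a decode-time store: its stack and the out-objects are off every allocated
block (they lie in the stack region), the windows of `*f` are decode-time holes. -/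
theorem di_stores_ok {others : List Obj} {frames : List (Nat × FrameLayout)} {len : Nat} {A : Arena} {stored room : Int}
    {ysz : Nat → Nat} {u : State}
    (hpre : (Vorbis.Spec.vorbis_decode_initial.spec others frames len A stored room ysz).pre u)
    (hsp : 0x700000 ≤ (u.reg .rsp).toNat - 448 ∧ (u.reg .rsp).toNat ≤ 0x800000) :
    ∀ s, s ∈ [(⟨(u.reg .rsp).toNat - 448, (u.reg .rsp).toNat⟩ : Span),
      ⟨(u.reg .rdi).toNat + 48, (u.reg .rdi).toNat + 56⟩, ⟨(u.reg .rdi).toNat + 84, (u.reg .rdi).toNat + 96⟩,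
      ⟨(u.reg .rdi).toNat + 136, (u.reg .rdi).toNat + 144⟩, ⟨(u.reg .rdi).toNat + 1484, (u.reg .rdi).toNat + 1749⟩,
      ⟨(u.reg .rdi).toNat + 1752, (u.reg .rdi).toNat + 1784⟩, ⟨(u.reg .rdi).toNat + 1796, (u.reg .rdi).toNat + 1804⟩,
      ⟨(u.reg .rsi).toNat, (u.reg .rsi).toNat + 4⟩, ⟨(u.reg .rdx).toNat, (u.reg .rdx).toNat + 4⟩,
      ⟨(u.reg .rcx).toNat, (u.reg .rcx).toNat + 4⟩, ⟨(u.reg .r8).toNat, (u.reg .r8).toNat + 4⟩,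
      ⟨(u.reg .r9).toNat, (u.reg .r9).toNat + 4⟩] →
      StoreOK (RunBlk A len) u.mem (u.reg .rdi).toNat s := by
  obtain ⟨hsh, hinv, hpls, hple, hprs, hpre_, hpm, hapart⟩ := hpre
  have hoffS := hinv.offStack
  intro s hs
  obtain ⟨_, a1, a2⟩ := hpls
  obtain ⟨_, b1, b2⟩ := hple
  obtain ⟨_, c1, c2⟩ := hprs
  obtain ⟨_, d1, d2⟩ := hpre_
  obtain ⟨_, e1, e2⟩ := hpm
  simp only [List.mem_cons, List.not_mem_nil, or_false] at hs
  rcases hs with rfl | rfl | rfl | rfl | rfl | rfl | rfl | rfl | rfl | rfl | rfl | rfl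
  · refine StoreOK.off ?_
    intro B hB
    have := hoffS B hB
    simp only []
    omega
  · refine StoreOK.hole ?_
    unfold InHole
    simp only []
    omega
  · refine StoreOK.hole ?_
    unfold InHole
    simp only []
    omega
  · refine StoreOK.hole ?_
    unfold InHole
    simp only []
    omega
  · refine StoreOK.hole ?_
    unfold InHole
    simp only []
    omega
  · refine StoreOK.hole ?_
    unfold InHole
    simp only []
    omega
  · refine StoreOK.hole ?_
    unfold InHole
    simp only []
    omega
  all_goals
    refine StoreOK.off ?_
    intro B hB
    have := hoffS B hB
    simp only []
    omega

/-- **The postcondition from what the walk knows at a `ret`**: the function's footprint since the entry (its stack, the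
readers' windows of `*f`, `channel_buffer_start / _end`, the five out-objects), no shadow byte written, `Bits` of the exit
memory, the two zeroed fields, the result. The decode-time invariant is carried by `DecodeInv.frame_stores`. -/
theorem di_post_ok {others : List Obj} {frames : List (Nat × FrameLayout)} {len : Nat} {A : Arena} {stored room : Int}
    {ysz : Nat → Nat} {u v : State}
    (hpre : (Vorbis.Spec.vorbis_decode_initial.spec others frames len A stored room ysz).pre u)
    (hsp : 0x700000 ≤ (u.reg .rsp).toNat - 448 ∧ (u.reg .rsp).toNat ≤ 0x800000)
    (hsame : Mem.SameExcept [⟨(u.reg .rsp).toNat - 448, (u.reg .rsp).toNat⟩,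
      ⟨(u.reg .rdi).toNat + 48, (u.reg .rdi).toNat + 56⟩, ⟨(u.reg .rdi).toNat + 84, (u.reg .rdi).toNat + 96⟩,
      ⟨(u.reg .rdi).toNat + 136, (u.reg .rdi).toNat + 144⟩, ⟨(u.reg .rdi).toNat + 1484, (u.reg .rdi).toNat + 1749⟩,
      ⟨(u.reg .rdi).toNat + 1752, (u.reg .rdi).toNat + 1784⟩, ⟨(u.reg .rdi).toNat + 1796, (u.reg .rdi).toNat + 1804⟩,
      ⟨(u.reg .rsi).toNat, (u.reg .rsi).toNat + 4⟩, ⟨(u.reg .rdx).toNat, (u.reg .rdx).toNat + 4⟩,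
      ⟨(u.reg .rcx).toNat, (u.reg .rcx).toNat + 4⟩, ⟨(u.reg .r8).toNat, (u.reg .r8).toNat + 4⟩,
      ⟨(u.reg .r9).toNat, (u.reg .r9).toNat + 4⟩] u.mem v.mem)
    (hun : ShadowUntouched u.mem v.mem)
    (hbits : Bits (RunBlk A len) len v.mem (u.reg .rdi).toNat)
    (hcbs : v.mem.readLE (u.reg .rdi + 1800) 4 = 0)
    (hcbe : v.mem.readLE (u.reg .rdi + 1796) 4 = 0)
    (hres : s32 (v.reg .rax) = 0 ∨ s32 (v.reg .rax) = 1)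
    (hdm : s32 (v.reg .rax) = 1 → Top.DecodedMode v.mem (u.reg .rdi).toNat (u.reg .rsi).toNat (u.reg .rdx).toNat
      (u.reg .rcx).toNat (u.reg .r8).toNat (u.reg .r9).toNat) :
    (Vorbis.Spec.vorbis_decode_initial.spec others frames len A stored room ysz).post u v := by
  obtain ⟨hsh, hinv, hpls, hple, hprs, hpre_, hpm, hapart⟩ := hpre
  have hoffS := hinv.offStack
  have hr := hbits.OBR
  simp only [voff] at hr
  -- every window of the footprint is a decode-time store
  have hw : ∀ s, s ∈ [(⟨(u.reg .rsp).toNat - 448, (u.reg .rsp).toNat⟩ : Span),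
      ⟨(u.reg .rdi).toNat + 48, (u.reg .rdi).toNat + 56⟩, ⟨(u.reg .rdi).toNat + 84, (u.reg .rdi).toNat + 96⟩,
      ⟨(u.reg .rdi).toNat + 136, (u.reg .rdi).toNat + 144⟩, ⟨(u.reg .rdi).toNat + 1484, (u.reg .rdi).toNat + 1749⟩,
      ⟨(u.reg .rdi).toNat + 1752, (u.reg .rdi).toNat + 1784⟩, ⟨(u.reg .rdi).toNat + 1796, (u.reg .rdi).toNat + 1804⟩,
      ⟨(u.reg .rsi).toNat, (u.reg .rsi).toNat + 4⟩, ⟨(u.reg .rdx).toNat, (u.reg .rdx).toNat + 4⟩,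
      ⟨(u.reg .rcx).toNat, (u.reg .rcx).toNat + 4⟩, ⟨(u.reg .r8).toNat, (u.reg .r8).toNat + 4⟩,
      ⟨(u.reg .r9).toNat, (u.reg .r9).toNat + 4⟩] →
      StoreOK (RunBlk A len) u.mem (u.reg .rdi).toNat s := by
    intro s hs
    obtain ⟨_, a1, a2⟩ := hpls
    obtain ⟨_, b1, b2⟩ := hple
    obtain ⟨_, c1, c2⟩ := hprs
    obtain ⟨_, d1, d2⟩ := hpre_
    obtain ⟨_, e1, e2⟩ := hpm
    simp only [List.mem_cons, List.not_mem_nil, or_false] at hs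
    rcases hs with rfl | rfl | rfl | rfl | rfl | rfl | rfl | rfl | rfl | rfl | rfl | rfl
    · refine StoreOK.off ?_
      intro B hB
      have := hoffS B hB
      simp only []
      omega
    · refine StoreOK.hole ?_
      unfold InHole
      simp only []
      omega
    · refine StoreOK.hole ?_
      unfold InHole
      simp only []
      omega
    · refine StoreOK.hole ?_
      unfold InHole
      simp only []
      omega
    · refine StoreOK.hole ?_
      unfold InHole
      simp only []
      omega
    · refine StoreOK.hole ?_
      unfold InHole
      simp only []
      omega
    · refine StoreOK.hole ?_
      unfold InHole
      simp only []
      omega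
    all_goals
      refine StoreOK.off ?_
      intro B hB
      have := hoffS B hB
      simp only []
      omega
  have hds : DecodeSame (u.reg .rdi).toNat u.mem v.mem :=
    StoreOK.decodeSame hinv.ok hinv.ob1 hinv.sep hsame hw
  have henv : Env (RunBlk A len) (Asan.Live (stackObjs frames ++ others)) v.mem := hinv.fb.env.eqOn hun
  have hoffO := hinv.objOff
  simp only [Off.sizeof.stb_vorbis] at hoffO
  -- the windows that are not holes read the same
  have hmiss : ∀ lo hi : Nat, hi ≤ 1808 → (hi ≤ 48 ∨ (56 ≤ lo ∧ hi ≤ 84) ∨ (96 ≤ lo ∧ hi ≤ 136) ∨ (144 ≤ lo ∧ hi ≤ 1484) ∨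
      (1749 ≤ lo ∧ hi ≤ 1752) ∨ (1784 ≤ lo ∧ hi ≤ 1796) ∨ 1804 ≤ lo) →
      ∀ s, s ∈ [(⟨(u.reg .rsp).toNat - 448, (u.reg .rsp).toNat⟩ : Span),
      ⟨(u.reg .rdi).toNat + 48, (u.reg .rdi).toNat + 56⟩, ⟨(u.reg .rdi).toNat + 84, (u.reg .rdi).toNat + 96⟩,
      ⟨(u.reg .rdi).toNat + 136, (u.reg .rdi).toNat + 144⟩, ⟨(u.reg .rdi).toNat + 1484, (u.reg .rdi).toNat + 1749⟩,
      ⟨(u.reg .rdi).toNat + 1752, (u.reg .rdi).toNat + 1784⟩, ⟨(u.reg .rdi).toNat + 1796, (u.reg .rdi).toNat + 1804⟩,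
      ⟨(u.reg .rsi).toNat, (u.reg .rsi).toNat + 4⟩, ⟨(u.reg .rdx).toNat, (u.reg .rdx).toNat + 4⟩,
      ⟨(u.reg .rcx).toNat, (u.reg .rcx).toNat + 4⟩, ⟨(u.reg .r8).toNat, (u.reg .r8).toNat + 4⟩,
      ⟨(u.reg .r9).toNat, (u.reg .r9).toNat + 4⟩] →
      (u.reg .rdi).toNat + hi ≤ s.lo ∨ s.hi ≤ (u.reg .rdi).toNat + lo := by
    intro lo hi hhi hcase s hs
    obtain ⟨_, a1, a2⟩ := hpls
    obtain ⟨_, b1, b2⟩ := hple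
    obtain ⟨_, c1, c2⟩ := hprs
    obtain ⟨_, d1, d2⟩ := hpre_
    obtain ⟨_, e1, e2⟩ := hpm
    simp only [List.mem_cons, List.not_mem_nil, or_false] at hs
    rcases hs with rfl | rfl | rfl | rfl | rfl | rfl | rfl | rfl | rfl | rfl | rfl | rfl <;> simp only [] <;> omega
  have hado : ADO A others v.mem (u.reg .rdi).toNat := by
    refine ADO.frame_stores hinv.fb.ado hsame (by simp only [voff]; omega) ?_ ?_
    · intro s hs
      have := hmiss 112 136 (by omega) (by omega) s hs
      omega
    · intro s hs
      have := hmiss 12 16 (by omega) (by omega) s hs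
      omega
  have h7 : Mdct.M7Range v.mem (u.reg .rdi).toNat := by
    refine Mdct.M7Range.transfer hinv.fb.vorbis.buffers.M7 ?_
    refine ObjEq.of_sameExcept hsame ?_ ?_
    · intro w hw'
      simp only [Mdct.M7Range.wins, List.mem_cons, List.mem_nil_iff, or_false] at hw'
      rcases hw' with rfl | rfl <;> simp only [] <;> omega
    · intro w hw' s hs
      simp only [Mdct.M7Range.wins, List.mem_cons, List.mem_nil_iff, or_false] at hw'
      rcases hw' with rfl | rfl
      · exact hmiss 156 160 (by omega) (by omega) s hs
      · exact hmiss 1256 1260 (by omega) (by omega) s hs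
  have hw1 : W1 v.mem (u.reg .rdi).toNat := by
    refine W1.transfer hinv.fb.vorbis.w1 ?_
    refine ObjEq.of_sameExcept hsame ?_ ?_
    · intro w hw'
      simp only [W1.wins, List.mem_cons, List.mem_nil_iff, or_false] at hw'
      rcases hw' with rfl | rfl <;> simp only [] <;> omega
    · intro w hw' s hs
      simp only [W1.wins, List.mem_cons, List.mem_nil_iff, or_false] at hw'
      rcases hw' with rfl | rfl
      · exact hmiss 152 160 (by omega) (by omega) s hs
      · exact hmiss 1784 1788 (by omega) (by omega) s hs
  have hinv' := hinv.frame_stores hsame hw henv hado (fun _ => hbits) (fun _ => h7) (fun _ => hw1)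
  refine ⟨hun, hinv', hds, ?_, ?_, hres, hdm⟩
  · simp only [vacc, voff]
    have e : v.mem.readLE (addr ((u.reg .rdi).toNat + 1796)) 4 = 0 :=
      (readLE_field v.mem (u.reg .rdi) 1796 4).symm.trans hcbe
    rw [Mem.i32_def]
    unfold Mem.u32
    rw [e]
    decide
  · simp only [vacc, voff]
    have e : v.mem.readLE (addr ((u.reg .rdi).toNat + 1800)) 4 = 0 :=
      (readLE_field v.mem (u.reg .rdi) 1800 4).symm.trans hcbs
    rw [Mem.i32_def]
    unfold Mem.u32
    rw [e]
    decide

/-- `lea rax, [r15 + r15*2] ; lea r14, [rbx + rax*2 + 0x1e4]`: six times a small index, as a number. -/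
theorem di_lea6 (sx : Word) (i : Nat) (h : sx.toNat = i) (hi : i < 64) : ((sx + sx * 2) * 2).toNat = 6 * i := by
  have e2 : (2 : Word).toNat = 2 := rfl
  rw [UInt64.toNat_mul, UInt64.toNat_add, UInt64.toNat_mul, h, e2]
  omega

/-! ### The `sar` arithmetic of the window (segments 7 and 8): the walker's forms as `int`s -/

/-- A 32-bit pattern as the `int` it is. -/
theorem di_sint32_toNat (x : BitVec 32) : sint32 x.toNat = x.toInt := by
  have := x.isLt
  unfold sint32
  rw [BitVec.toInt_eq_toNat_cond]
  split <;> split <;> omega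

/-- A dword as the `int` it is. -/
theorem di_sint32_ofNat (n : Nat) (h : n < 2 ^ 32) : (BitVec.ofNat 32 n).toInt = sint32 n := by
  rw [← di_sint32_toNat, BitVec.toNat_ofNat, Nat.mod_eq_of_lt h]

set_option maxRecDepth 4000 in
/-- **`sar r32, k` of a dword, stored**: the floor division of the `int` by `2 ^ k` (the form the walker leaves in `w_mem`). -/
theorem di_sar (n k : Nat) (h : n < 2 ^ 32) :
    sint32 ((BitVec.ofNat 32 n).sshiftRight k).toNat = sint32 n / 2 ^ k := by
  have e : ((2 ^ k : Nat) : Int) = (2 : Int) ^ k := by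
    rw [Int.natCast_pow]
    rfl
  rw [di_sint32_toNat, BitVec.toInt_sshiftRight, Int.shiftRight_eq_div_pow, di_sint32_ofNat n h, e]

set_option maxRecDepth 4000 in
/-- **`sub r32, [m] ; sar r32, k`** of two small non-negative `int`s: nothing wraps. -/
theorem di_sub_sar (a b k : Nat) (ha : a < 2 ^ 30) (hb : b < 2 ^ 30) :
    sint32 ((BitVec.ofNat 32 a - BitVec.ofNat 32 b).sshiftRight k).toNat = (sint32 a - sint32 b) / 2 ^ k := by
  have ea : (BitVec.ofNat 32 a).toInt = (a : Int) := by
    rw [di_sint32_ofNat a (by omega)]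
    unfold sint32
    split <;> omega
  have eb : (BitVec.ofNat 32 b).toInt = (b : Int) := by
    rw [di_sint32_ofNat b (by omega)]
    unfold sint32
    split <;> omega
  have e1 : sint32 a = (a : Int) := by
    unfold sint32
    split <;> omega
  have e2 : sint32 b = (b : Int) := by
    unfold sint32
    split <;> omega
  rw [di_sint32_toNat, BitVec.toInt_sshiftRight, Int.shiftRight_eq_div_pow, BitVec.toInt_sub, ea, eb, e1, e2]
  have e : ((2 ^ k : Nat) : Int) = (2 : Int) ^ k := by
    rw [Int.natCast_pow]
    rfl
  rw [e]
  congr 1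
  simp only [Int.bmod_def]
  omega

set_option maxRecDepth 4000 in
/-- **`add r32, [m] ; sar r32, k`** of two small non-negative `int`s: nothing wraps. -/
theorem di_add_sar (a b k : Nat) (ha : a < 2 ^ 30) (hb : b < 2 ^ 30) :
    sint32 ((BitVec.ofNat 32 a + BitVec.ofNat 32 b).sshiftRight k).toNat = (sint32 a + sint32 b) / 2 ^ k := by
  have ea : (BitVec.ofNat 32 a).toInt = (a : Int) := by
    rw [di_sint32_ofNat a (by omega)]
    unfold sint32
    split <;> omega
  have eb : (BitVec.ofNat 32 b).toInt = (b : Int) := by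
    rw [di_sint32_ofNat b (by omega)]
    unfold sint32
    split <;> omega
  have e1 : sint32 a = (a : Int) := by
    unfold sint32
    split <;> omega
  have e2 : sint32 b = (b : Int) := by
    unfold sint32
    split <;> omega
  rw [di_sint32_toNat, BitVec.toInt_sshiftRight, Int.shiftRight_eq_div_pow, BitVec.toInt_add, ea, eb, e1, e2]
  have e : ((2 ^ k : Nat) : Int) = (2 : Int) ^ k := by
    rw [Int.natCast_pow]
    rfl
  have hw : ((a : Int) + (b : Int)).bmod (2 ^ 32) = (a : Int) + (b : Int) := by
    simp only [Int.bmod_def]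
    omega
  rw [e, hw]

/-! ### PART 2. The cut-point assertions (every one is about the entry state `u` and the present state `s`) -/

/-- The registers a loop round may change (everything but r15 and the vector state). A walk needs the literal list:
`unfold iLoopRegs at w_kept` first. -/
def iLoopRegs : List Reg := [.rbx, .rbp, .r12, .r13, .r14, .rsp, .rdi, .rax, .rcx, .rdx, .rsi, .r8, .r9, .r10, .r11,
    .r16, .r17, .r18, .r19, .r20, .r21, .r22, .r23, .r24, .r25, .r26, .r27, .r28, .r29, .r30, .r31]

/-- **The function was entered at `u` by a call** (return address `ret`) **with its precondition**: the hypothesis every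
segment's claim has besides its cut-point assertion. -/
structure IEntered (others : List Obj) (frames : List (Nat × FrameLayout)) (len : Nat) (A : Arena) (stored room : Int) (ysz : Nat → Nat) (u₀ u : State) (ret : Word) : Prop where
  /-- the function was entered at `u` by a call -/
  entry : AtEntry (conv u₀) L.vorbis_decode_initial.entry (vorbis_decode_initial.spec others frames len A stored room ysz).frame ret u
  /-- the precondition at the entry -/
  pre : (vorbis_decode_initial.spec others frames len A stored room ysz).pre u

/-- **What holds at every cut point after the prologue**, for the footprint `ws` so far (the literal list of `IAt` before the
mode is stored, of `IAtM` after). It is the LAST field of `IAt` / `IAtM` / `IAtWin` / `IAtRight`, so an anonymous constructor and an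
`obtain` pattern list its fields after theirs. -/
structure IFrame (Blk : Block → Prop) (len : Nat) (u₀ u : State) (ret : Word) (ws : List Span) (s : State) : Prop where
  /-- the image's text is unchanged (`CodeOK u₀ s.mem`, unfolded: the walker's `w_eq`) -/
  code : Mem.EqOn 1048576 1154368 u₀.mem s.mem
  /-- the footprint since the entry -/
  same : Mem.SameExcept ws u.mem s.mem
  /-- no shadow byte was written -/
  un : ShadowUntouched u.mem s.mem
  /-- the return address -/
  s0 : UInt64.ofNat (s.mem.readLE (u.reg .rsp) 8) = ret
  /-- `push r15` -/
  s1 : UInt64.ofNat (s.mem.readLE (u.reg .rsp - 8) 8) = u.reg .r15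
  /-- `push r14` -/
  s2 : UInt64.ofNat (s.mem.readLE (u.reg .rsp - 16) 8) = u.reg .r14
  /-- `push r13` -/
  s3 : UInt64.ofNat (s.mem.readLE (u.reg .rsp - 24) 8) = u.reg .r13
  /-- `push r12` -/
  s4 : UInt64.ofNat (s.mem.readLE (u.reg .rsp - 32) 8) = u.reg .r12
  /-- `push rbp` -/
  s5 : UInt64.ofNat (s.mem.readLE (u.reg .rsp - 40) 8) = u.reg .rbp
  /-- `push rbx` -/
  s6 : UInt64.ofNat (s.mem.readLE (u.reg .rsp - 48) 8) = u.reg .rbx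
  /-- `[rsp + 8] = p_right_start` (`mov [rsp+8], rcx` at 0x113177; read at 0x113362 / 0x113394) -/
  s7 : UInt64.ofNat (s.mem.readLE (u.reg .rsp - 80) 8) = u.reg .rcx
  /-- `[rsp + 10H] = p_right_end` (`mov [rsp+10H], r8` at 0x11317c; read at 0x11337d / 0x1133a7) -/
  s8 : UInt64.ofNat (s.mem.readLE (u.reg .rsp - 72) 8) = u.reg .r8
  /-- DF = 0 -/
  df : s.flags .df = false
  /-- the six SSE exception masks are set -/
  mx : s.mxcsr &&& 8064 = 8064
  /-- the bit reader's invariant in the PRESENT memory (every reader's post gives it back; `di_keep` over own stores) -/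
  bits : Bits Blk len s.mem (u.reg .rdi).toNat
  /-- `f->channel_buffer_start = 0` (the store at 0x11318b; the post asks it) -/
  cbs : s.mem.readLE (u.reg .rdi + 1800) 4 = 0
  /-- `f->channel_buffer_end = 0` (the store at 0x1131a1) -/
  cbe : s.mem.readLE (u.reg .rdi + 1796) 4 = 0

/-- The number of a stack address `R − k` of the function's frame (`R` the entry stack pointer, inside the stack region). -/
theorem di_toNat_sub (r : Word) (k : Nat) (hk : k ≤ 448) (hR : 0x700000 + 448 ≤ r.toNat) :
    (r - UInt64.ofNat k).toNat = r.toNat - k := by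
  have hle : (UInt64.ofNat k) ≤ r := by
    rw [UInt64.le_iff_toNat_le, UInt64.toNat_ofNat', Nat.mod_eq_of_lt (by omega)]
    omega
  rw [UInt64.toNat_sub_of_le _ _ hle, UInt64.toNat_ofNat', Nat.mod_eq_of_lt (by omega)]

/-- **`IFrame` IS CARRIED OVER A BATCH OF STORES** `ws'` (a callee's footprint, the own stores of a stretch): every window lies inside
the footprint `ws` so far (`hin`), misses the nine slots `[R − 80, R − 64)`, `[R − 48, R + 8)` and the two zeroed fields
`[f + 1796, f + 1804)` (`hoff`; `R` = the entry rsp, `f` = the entry rdi).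

HOW: `hs` = what was written since the cut point `s` (`by u_same` on the walker's `w_mem`; after a call use `IFrame.carry_call`);
`hin`, `hoff`: `simp only [List.forall_mem_cons, List.not_mem_nil, false_imp_iff, implies_true, and_true, X86.User.inSpans_cons,
X86.User.inSpans_nil, or_false]`, `repeat' apply And.intro`, `all_goals u_omega` (or `omega` with the numbers named); `hcode` = the walker's
`w_eq`; `hun` = `by v_untouched`; `hdf`, `hmx` = the walker's `w_df…`, `w_mx` (after `rw [w_flags]` / `rw [w_mxcsr]`); `hbits` = `Bits` of the
NEW memory: a reader's post (`GetBitsPost.bits`, `….reader.bits`) if `*f` was written, else `(di_keep h.bits hs …).1`. -/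
theorem IFrame.carry {Blk : Block → Prop} {len : Nat} {u₀ u : State} {ret : Word} {ws ws' : List Span} {s s' : State}
    (h : IFrame Blk len u₀ u ret ws s)
    (hsp : 0x700000 ≤ (u.reg .rsp).toNat - 448 ∧ (u.reg .rsp).toNat ≤ 0x800000)
    (hf : (u.reg .rdi).toNat + 1808 ≤ 2 ^ 32)
    (hs : Mem.SameExcept ws' s.mem s'.mem)
    (hin : ∀ w ∈ ws', InSpans ws w.lo (w.hi - w.lo))
    (hoff : ∀ w ∈ ws', (w.hi ≤ (u.reg .rsp).toNat - 80 ∨ ((u.reg .rsp).toNat - 64 ≤ w.lo ∧ w.hi ≤ (u.reg .rsp).toNat - 48) ∨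
        (u.reg .rsp).toNat + 8 ≤ w.lo) ∧
      (w.hi ≤ (u.reg .rdi).toNat + 1796 ∨ (u.reg .rdi).toNat + 1804 ≤ w.lo))
    (hcode : Mem.EqOn 1048576 1154368 u₀.mem s'.mem) (hun : ShadowUntouched u.mem s'.mem)
    (hdf : s'.flags .df = false) (hmx : s'.mxcsr &&& 8064 = 8064)
    (hbits : Bits Blk len s'.mem (u.reg .rdi).toNat) :
    IFrame Blk len u₀ u ret ws s' := by
  have hR : 0x700000 + 448 ≤ (u.reg .rsp).toNat := by omega
  have t8 : (u.reg .rsp - 8).toNat = (u.reg .rsp).toNat - 8 := di_toNat_sub (u.reg .rsp) 8 (by omega) hR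
  have t16 : (u.reg .rsp - 16).toNat = (u.reg .rsp).toNat - 16 := di_toNat_sub (u.reg .rsp) 16 (by omega) hR
  have t24 : (u.reg .rsp - 24).toNat = (u.reg .rsp).toNat - 24 := di_toNat_sub (u.reg .rsp) 24 (by omega) hR
  have t32 : (u.reg .rsp - 32).toNat = (u.reg .rsp).toNat - 32 := di_toNat_sub (u.reg .rsp) 32 (by omega) hR
  have t40 : (u.reg .rsp - 40).toNat = (u.reg .rsp).toNat - 40 := di_toNat_sub (u.reg .rsp) 40 (by omega) hR
  have t48 : (u.reg .rsp - 48).toNat = (u.reg .rsp).toNat - 48 := di_toNat_sub (u.reg .rsp) 48 (by omega) hR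
  have t72 : (u.reg .rsp - 72).toNat = (u.reg .rsp).toNat - 72 := di_toNat_sub (u.reg .rsp) 72 (by omega) hR
  have t80 : (u.reg .rsp - 80).toNat = (u.reg .rsp).toNat - 80 := di_toNat_sub (u.reg .rsp) 80 (by omega) hR
  have a1800 : (u.reg .rdi + 1800).toNat = (u.reg .rdi).toNat + 1800 := toNat_add_ofNat (u.reg .rdi) 1800 (by omega)
  have a1796 : (u.reg .rdi + 1796).toNat = (u.reg .rdi).toNat + 1796 := toNat_add_ofNat (u.reg .rdi) 1796 (by omega)
  refine
    { code := hcode, same := Reader.sameExcept_through_callee h.same hs hin, un := hun,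
      s0 := ?s0, s1 := ?s1, s2 := ?s2, s3 := ?s3, s4 := ?s4, s5 := ?s5, s6 := ?s6, s7 := ?s7, s8 := ?s8,
      df := hdf, mx := hmx, bits := hbits, cbs := ?cbs, cbe := ?cbe }
  case s0 =>
    rw [hs.readLE (u.reg .rsp) 8 (by omega) (fun w hw => by have := (hoff w hw).1; omega)]
    exact h.s0
  case s1 =>
    rw [hs.readLE (u.reg .rsp - 8) 8 (by omega) (fun w hw => by have := (hoff w hw).1; omega)]
    exact h.s1
  case s2 =>
    rw [hs.readLE (u.reg .rsp - 16) 8 (by omega) (fun w hw => by have := (hoff w hw).1; omega)]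
    exact h.s2
  case s3 =>
    rw [hs.readLE (u.reg .rsp - 24) 8 (by omega) (fun w hw => by have := (hoff w hw).1; omega)]
    exact h.s3
  case s4 =>
    rw [hs.readLE (u.reg .rsp - 32) 8 (by omega) (fun w hw => by have := (hoff w hw).1; omega)]
    exact h.s4
  case s5 =>
    rw [hs.readLE (u.reg .rsp - 40) 8 (by omega) (fun w hw => by have := (hoff w hw).1; omega)]
    exact h.s5
  case s6 =>
    rw [hs.readLE (u.reg .rsp - 48) 8 (by omega) (fun w hw => by have := (hoff w hw).1; omega)]
    exact h.s6
  case s7 =>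
    rw [hs.readLE (u.reg .rsp - 80) 8 (by omega) (fun w hw => by have := (hoff w hw).1; omega)]
    exact h.s7
  case s8 =>
    rw [hs.readLE (u.reg .rsp - 72) 8 (by omega) (fun w hw => by have := (hoff w hw).1; omega)]
    exact h.s8
  case cbs =>
    rw [hs.readLE (u.reg .rdi + 1800) 4 (by omega) (fun w hw => by have := (hoff w hw).2; omega)]
    exact h.cbs
  case cbe =>
    rw [hs.readLE (u.reg .rdi + 1796) 4 (by omega) (fun w hw => by have := (hoff w hw).2; omega)]
    exact h.cbe

/-- **`IFrame` over a call**: the return address `ra` pushed at `[R − 96, R − 88)` (every callee is called at the steady rsp `R − 88`)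
and then the callee's footprint `ws'` (`v_after_call`'s `w_same`, with the callee's rdi rewritten: see the worked proofs .2 .4). The
window of the push is added to the batch; `hin` / `hoff` are asked of the callee's windows only, and of the push once, here. -/
theorem IFrame.carry_call {Blk : Block → Prop} {len : Nat} {u₀ u : State} {ret : Word} {ws ws' : List Span} {s s' : State}
    (h : IFrame Blk len u₀ u ret ws s) (ra : Nat)
    (hsp : 0x700000 ≤ (u.reg .rsp).toNat - 448 ∧ (u.reg .rsp).toNat ≤ 0x800000)
    (hf : (u.reg .rdi).toNat + 1808 ≤ 2 ^ 32)
    (hstack : InSpans ws ((u.reg .rsp).toNat - 96) 8)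
    (hfar : (u.reg .rsp).toNat - 88 ≤ (u.reg .rdi).toNat + 1796 ∨ (u.reg .rdi).toNat + 1804 ≤ (u.reg .rsp).toNat - 96)
    (hs : Mem.SameExcept ws' (s.mem.writeLE (u.reg .rsp - 96) 8 ra) s'.mem)
    (hin : ∀ w ∈ ws', InSpans ws w.lo (w.hi - w.lo))
    (hoff : ∀ w ∈ ws', (w.hi ≤ (u.reg .rsp).toNat - 80 ∨ ((u.reg .rsp).toNat - 64 ≤ w.lo ∧ w.hi ≤ (u.reg .rsp).toNat - 48) ∨
        (u.reg .rsp).toNat + 8 ≤ w.lo) ∧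
      (w.hi ≤ (u.reg .rdi).toNat + 1796 ∨ (u.reg .rdi).toNat + 1804 ≤ w.lo))
    (hcode : Mem.EqOn 1048576 1154368 u₀.mem s'.mem) (hun : ShadowUntouched u.mem s'.mem)
    (hdf : s'.flags .df = false) (hmx : s'.mxcsr &&& 8064 = 8064)
    (hbits : Bits Blk len s'.mem (u.reg .rdi).toNat) :
    IFrame Blk len u₀ u ret ws s' := by
  have hR : 0x700000 + 448 ≤ (u.reg .rsp).toNat := by omega
  have t96 : (u.reg .rsp - 96).toNat = (u.reg .rsp).toNat - 96 := di_toNat_sub (u.reg .rsp) 96 (by omega) hR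
  -- the push and the callee's footprint as one batch
  have hpush : Mem.SameExcept (⟨(u.reg .rsp).toNat - 96, (u.reg .rsp).toNat - 88⟩ :: ws') s.mem
      (s.mem.writeLE (u.reg .rsp - 96) 8 ra) := by
    apply Mem.SameExcept.writeLE _ _ _ _ _ (by omega)
    exact ⟨_, List.mem_cons_self, by simp only []; omega, by simp only []; omega⟩
  have hboth : Mem.SameExcept (⟨(u.reg .rsp).toNat - 96, (u.reg .rsp).toNat - 88⟩ :: ws') s.mem s'.mem := by
    apply hpush.step_same hs
    intro w hw a h1 h2
    exact ⟨w, List.mem_cons_of_mem _ hw, h1, h2⟩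
  apply h.carry hsp hf hboth _ _ hcode hun hdf hmx hbits
  · intro w hw
    rcases List.mem_cons.mp hw with rfl | hw'
    · obtain ⟨w0, hw0, k1, k2⟩ := hstack
      exact ⟨w0, hw0, by simp only []; omega, by simp only []; omega⟩
    · exact hin w hw'
  · intro w hw
    rcases List.mem_cons.mp hw with rfl | hw'
    · refine ⟨Or.inl (by simp only []; omega), ?_⟩
      simp only []
      omega
    · exact hoff w hw'

/-- **`IFrame` over a call of get_bits** (the form `v_after_call` leaves: `w_same` after `simp only [c_rdi] at w_same`, `c_rdi` the
callee's `w_rdi` saved before; `fr` = the callee's frame, 352): for EVERY footprint that begins with the seven windows of `IAt` (`extra` =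
`[]` for `IAt`, the five out-objects for `IAtM` / `IAtWin` / `IAtRight`: found by unification). `hoffS` = `DecodeInv.objOff` (`*f` is off
the stack region), `hbits` = `GetBitsPost.bits`. The same statement serves get8_packet and maybe_start_packet if their `w_same` lists
these five windows of `*f` (a shorter list: `Mem.SameExcept.mono` first). Example: farm/worked/vorbis_decode_initial.6. -/
theorem IFrame.carry_get_bits {Blk : Block → Prop} {len : Nat} {u₀ u : State} {ret : Word} {extra : List Span} {s s' : State}
    (h : IFrame Blk len u₀ u ret
      (⟨(u.reg .rsp).toNat - 448, (u.reg .rsp).toNat⟩ ::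
        ⟨(u.reg .rdi).toNat + 48, (u.reg .rdi).toNat + 56⟩ :: ⟨(u.reg .rdi).toNat + 84, (u.reg .rdi).toNat + 96⟩ ::
        ⟨(u.reg .rdi).toNat + 136, (u.reg .rdi).toNat + 144⟩ :: ⟨(u.reg .rdi).toNat + 1484, (u.reg .rdi).toNat + 1749⟩ ::
        ⟨(u.reg .rdi).toNat + 1752, (u.reg .rdi).toNat + 1784⟩ :: ⟨(u.reg .rdi).toNat + 1796, (u.reg .rdi).toNat + 1804⟩ :: extra) s)
    (ra fr : Nat) (hfr : fr ≤ 352)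
    (hsp : 0x700000 ≤ (u.reg .rsp).toNat - 448 ∧ (u.reg .rsp).toNat ≤ 0x800000)
    (hf : (u.reg .rdi).toNat + 1808 ≤ 2 ^ 32)
    (hoffS : (u.reg .rdi).toNat + 1808 ≤ 0x700000 ∨ 0x800000 ≤ (u.reg .rdi).toNat)
    (hs : Mem.SameExcept [⟨(u.reg .rsp - 96).toNat - fr, (u.reg .rsp - 96).toNat⟩,
      ⟨(u.reg .rdi).toNat + 48, (u.reg .rdi).toNat + 56⟩, ⟨(u.reg .rdi).toNat + 84, (u.reg .rdi).toNat + 96⟩,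
      ⟨(u.reg .rdi).toNat + 136, (u.reg .rdi).toNat + 144⟩, ⟨(u.reg .rdi).toNat + 1484, (u.reg .rdi).toNat + 1749⟩,
      ⟨(u.reg .rdi).toNat + 1752, (u.reg .rdi).toNat + 1784⟩] (s.mem.writeLE (u.reg .rsp - 96) 8 ra) s'.mem)
    (hcode : Mem.EqOn 1048576 1154368 u₀.mem s'.mem) (hun : ShadowUntouched u.mem s'.mem)
    (hdf : s'.flags .df = false) (hmx : s'.mxcsr &&& 8064 = 8064)
    (hbits : Bits Blk len s'.mem (u.reg .rdi).toNat) :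
    IFrame Blk len u₀ u ret
      (⟨(u.reg .rsp).toNat - 448, (u.reg .rsp).toNat⟩ ::
        ⟨(u.reg .rdi).toNat + 48, (u.reg .rdi).toNat + 56⟩ :: ⟨(u.reg .rdi).toNat + 84, (u.reg .rdi).toNat + 96⟩ ::
        ⟨(u.reg .rdi).toNat + 136, (u.reg .rdi).toNat + 144⟩ :: ⟨(u.reg .rdi).toNat + 1484, (u.reg .rdi).toNat + 1749⟩ ::
        ⟨(u.reg .rdi).toNat + 1752, (u.reg .rdi).toNat + 1784⟩ :: ⟨(u.reg .rdi).toNat + 1796, (u.reg .rdi).toNat + 1804⟩ :: extra) s' := by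
  have hR : 0x700000 + 448 ≤ (u.reg .rsp).toNat := by omega
  have t96 : (u.reg .rsp - 96).toNat = (u.reg .rsp).toNat - 96 := di_toNat_sub (u.reg .rsp) 96 (by omega) hR
  rw [t96] at hs
  refine h.carry_call ra hsp hf ⟨_, List.mem_cons_self, by simp only []; omega, by simp only []; omega⟩ (by omega) hs ?_ ?_
    hcode hun hdf hmx hbits
  · intro w hw
    simp only [List.mem_cons, List.not_mem_nil, or_false] at hw
    rcases hw with rfl | rfl | rfl | rfl | rfl | rfl
    · exact ⟨_, List.mem_cons_self, by simp only []; omega, by simp only []; omega⟩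
    · exact ⟨⟨(u.reg .rdi).toNat + 48, (u.reg .rdi).toNat + 56⟩, by simp only [List.mem_cons, true_or, or_true],
        by simp only []; omega, by simp only []; omega⟩
    · exact ⟨⟨(u.reg .rdi).toNat + 84, (u.reg .rdi).toNat + 96⟩, by simp only [List.mem_cons, true_or, or_true],
        by simp only []; omega, by simp only []; omega⟩
    · exact ⟨⟨(u.reg .rdi).toNat + 136, (u.reg .rdi).toNat + 144⟩, by simp only [List.mem_cons, true_or, or_true],
        by simp only []; omega, by simp only []; omega⟩
    · exact ⟨⟨(u.reg .rdi).toNat + 1484, (u.reg .rdi).toNat + 1749⟩, by simp only [List.mem_cons, true_or, or_true],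
        by simp only []; omega, by simp only []; omega⟩
    · exact ⟨⟨(u.reg .rdi).toNat + 1752, (u.reg .rdi).toNat + 1784⟩, by simp only [List.mem_cons, true_or, or_true],
        by simp only []; omega, by simp only []; omega⟩
  · intro w hw
    simp only [List.mem_cons, List.not_mem_nil, or_false] at hw
    rcases hw with rfl | rfl | rfl | rfl | rfl | rfl <;> (simp only []; omega)

/-- **The assertion before the mode is known**, at `pc` ∈ {`loop1` = 0x1131b0 (`retry:`), `loop2` = 0x1131eb (the drain loop),
`at_1131fa` (the exit of the retry loop), `cut7` = 0x11321e (the return of `get_bits(f, ilog(f->mode_count-1))`)}: the footprint is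
the own stack, the readers' windows of `*f` and the two zeroed fields. rax rcx rdx rsi rdi r8–r11 are dead (rax: see the claims). -/
structure IAt (pc : Word) (Blk : Block → Prop) (len : Nat) (u₀ u : State) (ret : Word) (s : State) : Prop where
  /-- at the cut point -/
  rip : s.rip = pc
  /-- the steady stack pointer -/
  rsp : s.reg .rsp = u.reg .rsp - 88
  /-- `rbx = f` (`mov rbx, rdi` at 0x11316e) -/
  rbx : s.reg .rbx = u.reg .rdi
  /-- `r12 = p_left_end` (`mov r12, rdx` at 0x113174) -/
  r12 : s.reg .r12 = u.reg .rdx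
  /-- `r13 = p_left_start` (`mov r13, rsi` at 0x113171) -/
  r13 : s.reg .r13 = u.reg .rsi
  /-- `r14 = mode` (`mov r14, r9` at 0x113181; read at 0x113243) -/
  r14 : s.reg .r14 = u.reg .r9
  /-- r15 and the vector registers are as at the entry -/
  kept : RegsKept iLoopRegs u s
  /-- the frame facts, footprint: own stack, `f+48..56, 84..96, 136..144, 1484..1749, 1752..1784` (the readers), `f+1796..1804` -/
  frame : IFrame Blk len u₀ u ret
      [⟨(u.reg .rsp).toNat - 448, (u.reg .rsp).toNat⟩,
      ⟨(u.reg .rdi).toNat + 48, (u.reg .rdi).toNat + 56⟩, ⟨(u.reg .rdi).toNat + 84, (u.reg .rdi).toNat + 96⟩,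
      ⟨(u.reg .rdi).toNat + 136, (u.reg .rdi).toNat + 144⟩, ⟨(u.reg .rdi).toNat + 1484, (u.reg .rdi).toNat + 1749⟩,
      ⟨(u.reg .rdi).toNat + 1752, (u.reg .rdi).toNat + 1784⟩, ⟨(u.reg .rdi).toNat + 1796, (u.reg .rdi).toNat + 1804⟩] s

/-- **The assertion at `pc` = `ret12` = 0x113265** (`cmp BYTE PTR [r14], 0`, line 3177: the mode `i` is known, stored to `*mode`, and
`m = f->mode_config + i` is in r14): the five out-objects are in the footprint from here on; ebp = 0 (`f->eof` was tested), r15 = `i`. -/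
structure IAtM (pc : Word) (Blk : Block → Prop) (len : Nat) (u₀ u : State) (ret : Word) (i : Nat) (s : State) : Prop where
  /-- at the cut point -/
  rip : s.rip = pc
  /-- the steady stack pointer -/
  rsp : s.reg .rsp = u.reg .rsp - 88
  /-- `rbx = f` -/
  rbx : s.reg .rbx = u.reg .rdi
  /-- `r12 = p_left_end` -/
  r12 : s.reg .r12 = u.reg .rdx
  /-- `r13 = p_left_start` -/
  r13 : s.reg .r13 = u.reg .rsi
  /-- `r14 = m = f->mode_config + i` (`lea r14, [rbx + rax*2 + 1E4H]` at 0x113255: `Mode` has 6 bytes) -/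
  r14 : s.reg .r14 = addr ((u.reg .rdi).toNat + 484 + 6 * i)
  /-- `r15 = i` (`movsxd r15, eax` at 0x113228 of a value below `2 ^ 31`) -/
  r15 : s.reg .r15 = UInt64.ofNat i
  /-- `ebp = f->eof = 0` (tested at 0x1131c2; `prev` of the short arm) -/
  rbp : s.reg .rbp = 0
  /-- `i < mode_count ≤ 64` (the test at 0x113236, MD1), in the ENTRY memory (`mode_count` is off the footprint) -/
  ilt : i < 64 ∧ (i : Int) < stb_vorbis.mode_count u.mem (u.reg .rdi).toNat
  /-- `*mode = i` (the store at 0x11324b) -/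
  mode : s.mem.readLE (u.reg .r9) 4 = i
  /-- no register is claimed kept (the list names them all: the form a walk wants) -/
  kept : RegsKept [.r15, .rbx, .rbp, .r12, .r13, .r14, .rsp, .rdi, .rax, .rcx, .rdx, .rsi, .r8, .r9, .r10, .r11,
    .r16, .r17, .r18, .r19, .r20, .r21, .r22, .r23, .r24, .r25, .r26, .r27, .r28, .r29, .r30, .r31] u s
  /-- the frame facts, footprint: as `IAt` and the five 4-byte out-objects -/
  frame : IFrame Blk len u₀ u ret
      [⟨(u.reg .rsp).toNat - 448, (u.reg .rsp).toNat⟩,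
      ⟨(u.reg .rdi).toNat + 48, (u.reg .rdi).toNat + 56⟩, ⟨(u.reg .rdi).toNat + 84, (u.reg .rdi).toNat + 96⟩,
      ⟨(u.reg .rdi).toNat + 136, (u.reg .rdi).toNat + 144⟩, ⟨(u.reg .rdi).toNat + 1484, (u.reg .rdi).toNat + 1749⟩,
      ⟨(u.reg .rdi).toNat + 1752, (u.reg .rdi).toNat + 1784⟩, ⟨(u.reg .rdi).toNat + 1796, (u.reg .rdi).toNat + 1804⟩,
      ⟨(u.reg .rsi).toNat, (u.reg .rsi).toNat + 4⟩, ⟨(u.reg .rdx).toNat, (u.reg .rdx).toNat + 4⟩,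
      ⟨(u.reg .rcx).toNat, (u.reg .rcx).toNat + 4⟩, ⟨(u.reg .r8).toNat, (u.reg .r8).toNat + 4⟩,
      ⟨(u.reg .r9).toNat, (u.reg .r9).toNat + 4⟩] s

/-- **The assertion at the join `at_113282`** (`window_center = n >> 1`, line 3188; reached from 0x11327e, the short arm, and from
0x113312, the long arm after `prev = get_bits(f,1)`, `next = get_bits(f,1)`): `bf` = `m->blockflag` and `n` = the block size
(`blocksize_1` if `bf ≠ 0`, else `blocksize_0`), BOTH AS THE ENTRY MEMORY HAS THEM (the three fields are off the footprint: read
them in the present memory through `frame.same`); r15d = `n`. NOTHING is asserted about `prev` (ebp) and `next` (`[rsp + 1CH]`):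
the code tests `m->blockflag` again before it reads either, and W2 holds for every value of them. -/
structure IAtWin (Blk : Block → Prop) (len : Nat) (u₀ u : State) (ret : Word) (i bf n : Nat) (s : State) : Prop where
  /-- at the join -/
  rip : s.rip = L.vorbis_decode_initial.at_113282
  /-- the steady stack pointer -/
  rsp : s.reg .rsp = u.reg .rsp - 88
  /-- `rbx = f` -/
  rbx : s.reg .rbx = u.reg .rdi
  /-- `r12 = p_left_end` (read at 0x1132d1 / 0x113327) -/
  r12 : s.reg .r12 = u.reg .rdx
  /-- `r13 = p_left_start` (read at 0x1132b7 / 0x113317) -/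
  r13 : s.reg .r13 = u.reg .rsi
  /-- `r14 = m` (read at 0x11328b, 0x113293, 0x113337) -/
  r14 : s.reg .r14 = addr ((u.reg .rdi).toNat + 484 + 6 * i)
  /-- `r15d = n` (`mov r15d, [rbx + 98H]` at 0x113277 resp. `[rbx + 9CH]` at 0x1132eb: zero-extended) -/
  r15 : s.reg .r15 = Word.ofBV (BitVec.ofNat 32 n)
  /-- `i < mode_count ≤ 64`, in the entry memory -/
  ilt : i < 64 ∧ (i : Int) < stb_vorbis.mode_count u.mem (u.reg .rdi).toNat
  /-- `*mode = i` -/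
  mode : s.mem.readLE (u.reg .r9) 4 = i
  /-- `bf = m->blockflag`, in the entry memory -/
  flag : u.mem.readLE (addr ((u.reg .rdi).toNat + 484 + 6 * i)) 1 = bf
  /-- a short block: `n = f->blocksize_0` (`f + 98H`), in the entry memory -/
  n_short : bf = 0 → n = u.mem.readLE (u.reg .rdi + 152) 4
  /-- a long block: `n = f->blocksize_1` (`f + 9CH`), in the entry memory -/
  n_long : bf ≠ 0 → n = u.mem.readLE (u.reg .rdi + 156) 4
  /-- no register is claimed kept -/
  kept : RegsKept [.r15, .rbx, .rbp, .r12, .r13, .r14, .rsp, .rdi, .rax, .rcx, .rdx, .rsi, .r8, .r9, .r10, .r11,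
    .r16, .r17, .r18, .r19, .r20, .r21, .r22, .r23, .r24, .r25, .r26, .r27, .r28, .r29, .r30, .r31] u s
  /-- the frame facts, footprint: as `IAtM` -/
  frame : IFrame Blk len u₀ u ret
      [⟨(u.reg .rsp).toNat - 448, (u.reg .rsp).toNat⟩,
      ⟨(u.reg .rdi).toNat + 48, (u.reg .rdi).toNat + 56⟩, ⟨(u.reg .rdi).toNat + 84, (u.reg .rdi).toNat + 96⟩,
      ⟨(u.reg .rdi).toNat + 136, (u.reg .rdi).toNat + 144⟩, ⟨(u.reg .rdi).toNat + 1484, (u.reg .rdi).toNat + 1749⟩,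
      ⟨(u.reg .rdi).toNat + 1752, (u.reg .rdi).toNat + 1784⟩, ⟨(u.reg .rdi).toNat + 1796, (u.reg .rdi).toNat + 1804⟩,
      ⟨(u.reg .rsi).toNat, (u.reg .rsi).toNat + 4⟩, ⟨(u.reg .rdx).toNat, (u.reg .rdx).toNat + 4⟩,
      ⟨(u.reg .rcx).toNat, (u.reg .rcx).toNat + 4⟩, ⟨(u.reg .r8).toNat, (u.reg .r8).toNat + 4⟩,
      ⟨(u.reg .r9).toNat, (u.reg .r9).toNat + 4⟩] s

/-- **The assertion at the join `at_113337`** (`if (m->blockflag && !next)`, line 3196; reached from 0x1132dd, the arm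
`blockflag && !prev`, and from 0x113333): as `IAtWin` (r12, r13 are dead), `[rsp + 18H] = window_center = n >> 1`, and the LEFT HALF of
W2 is stored: `(*p_left_start, *p_left_end) = (0, n / 2)`, or — only for a long block — `((n − b0) / 4, (n + b0) / 4)` with `b0 =
f->blocksize_0` of the entry memory (`sar` = the floor division of the `int`s: `sint32`; nothing wraps, HD3). -/
structure IAtRight (Blk : Block → Prop) (len : Nat) (u₀ u : State) (ret : Word) (i bf n : Nat) (s : State) : Prop where
  /-- at the join -/
  rip : s.rip = L.vorbis_decode_initial.at_113337
  /-- the steady stack pointer -/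
  rsp : s.reg .rsp = u.reg .rsp - 88
  /-- `rbx = f` (read up to 0x113372) -/
  rbx : s.reg .rbx = u.reg .rdi
  /-- `r14 = m` (read at 0x113337, UNCHECKED there: the byte was checked at 0x113260 and 0x11328e) -/
  r14 : s.reg .r14 = addr ((u.reg .rdi).toNat + 484 + 6 * i)
  /-- `r15d = n` (read at 0x113344, 0x1133b4) -/
  r15 : s.reg .r15 = Word.ofBV (BitVec.ofNat 32 n)
  /-- `i < mode_count ≤ 64`, in the entry memory -/
  ilt : i < 64 ∧ (i : Int) < stb_vorbis.mode_count u.mem (u.reg .rdi).toNat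
  /-- `*mode = i` -/
  mode : s.mem.readLE (u.reg .r9) 4 = i
  /-- `bf = m->blockflag`, in the entry memory -/
  flag : u.mem.readLE (addr ((u.reg .rdi).toNat + 484 + 6 * i)) 1 = bf
  /-- a short block: `n = f->blocksize_0`, in the entry memory -/
  n_short : bf = 0 → n = u.mem.readLE (u.reg .rdi + 152) 4
  /-- a long block: `n = f->blocksize_1`, in the entry memory -/
  n_long : bf ≠ 0 → n = u.mem.readLE (u.reg .rdi + 156) 4
  /-- `[rsp + 18H] = window_center = n >> 1` (`sar eax, 1` stored at 0x113287; read at 0x1133a1) -/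
  wc : sint32 (s.mem.readLE (u.reg .rsp - 64) 4) = sint32 n / 2
  /-- W2's left half, as stored in `*p_left_start` (rsi) and `*p_left_end` (rdx) -/
  left : (sint32 (s.mem.readLE (u.reg .rsi) 4) = 0 ∧ sint32 (s.mem.readLE (u.reg .rdx) 4) = sint32 n / 2) ∨
    (bf ≠ 0 ∧
      sint32 (s.mem.readLE (u.reg .rsi) 4) = (sint32 n - sint32 (u.mem.readLE (u.reg .rdi + 152) 4)) / 4 ∧
      sint32 (s.mem.readLE (u.reg .rdx) 4) = (sint32 n + sint32 (u.mem.readLE (u.reg .rdi + 152) 4)) / 4)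
  /-- no register is claimed kept -/
  kept : RegsKept [.r15, .rbx, .rbp, .r12, .r13, .r14, .rsp, .rdi, .rax, .rcx, .rdx, .rsi, .r8, .r9, .r10, .r11,
    .r16, .r17, .r18, .r19, .r20, .r21, .r22, .r23, .r24, .r25, .r26, .r27, .r28, .r29, .r30, .r31] u s
  /-- the frame facts, footprint: as `IAtM` -/
  frame : IFrame Blk len u₀ u ret
      [⟨(u.reg .rsp).toNat - 448, (u.reg .rsp).toNat⟩,
      ⟨(u.reg .rdi).toNat + 48, (u.reg .rdi).toNat + 56⟩, ⟨(u.reg .rdi).toNat + 84, (u.reg .rdi).toNat + 96⟩,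
      ⟨(u.reg .rdi).toNat + 136, (u.reg .rdi).toNat + 144⟩, ⟨(u.reg .rdi).toNat + 1484, (u.reg .rdi).toNat + 1749⟩,
      ⟨(u.reg .rdi).toNat + 1752, (u.reg .rdi).toNat + 1784⟩, ⟨(u.reg .rdi).toNat + 1796, (u.reg .rdi).toNat + 1804⟩,
      ⟨(u.reg .rsi).toNat, (u.reg .rsi).toNat + 4⟩, ⟨(u.reg .rdx).toNat, (u.reg .rdx).toNat + 4⟩,
      ⟨(u.reg .rcx).toNat, (u.reg .rcx).toNat + 4⟩, ⟨(u.reg .r8).toNat, (u.reg .r8).toNat + 4⟩,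
      ⟨(u.reg .r9).toNat, (u.reg .r9).toNat + 4⟩] s

/-- **The assertion at the epilogue `at_1133c3`** (`add rsp, 28H ; pop … ; ret`, line 3205): the footprint with the five out-objects,
the slots of the six saved registers and the return address, `Bits`, the two zeroed fields, and the result in eax — 0 or 1, with
`Top.DecodedMode` of the PRESENT memory when it is 1. `di_post_ok` turns it into the contract's post. -/
structure IAtEnd (Blk : Block → Prop) (len : Nat) (u₀ u : State) (ret : Word) (s : State) : Prop where
  /-- at the epilogue -/
  rip : s.rip = L.vorbis_decode_initial.at_1133c3
  /-- the steady stack pointer -/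
  rsp : s.reg .rsp = u.reg .rsp - 88
  /-- no register is claimed kept (the list names them all: the form a walk wants) -/
  kept : RegsKept [.r15, .rbx, .rbp, .r12, .r13, .r14, .rsp, .rdi, .rax, .rcx, .rdx, .rsi, .r8, .r9, .r10, .r11,
    .r16, .r17, .r18, .r19, .r20, .r21, .r22, .r23, .r24, .r25, .r26, .r27, .r28, .r29, .r30, .r31] u s
  /-- the image's text is unchanged -/
  code : Mem.EqOn 1048576 1154368 u₀.mem s.mem
  /-- the footprint since the entry -/
  same : Mem.SameExcept [⟨(u.reg .rsp).toNat - 448, (u.reg .rsp).toNat⟩,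
      ⟨(u.reg .rdi).toNat + 48, (u.reg .rdi).toNat + 56⟩, ⟨(u.reg .rdi).toNat + 84, (u.reg .rdi).toNat + 96⟩,
      ⟨(u.reg .rdi).toNat + 136, (u.reg .rdi).toNat + 144⟩, ⟨(u.reg .rdi).toNat + 1484, (u.reg .rdi).toNat + 1749⟩,
      ⟨(u.reg .rdi).toNat + 1752, (u.reg .rdi).toNat + 1784⟩, ⟨(u.reg .rdi).toNat + 1796, (u.reg .rdi).toNat + 1804⟩,
      ⟨(u.reg .rsi).toNat, (u.reg .rsi).toNat + 4⟩, ⟨(u.reg .rdx).toNat, (u.reg .rdx).toNat + 4⟩,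
      ⟨(u.reg .rcx).toNat, (u.reg .rcx).toNat + 4⟩, ⟨(u.reg .r8).toNat, (u.reg .r8).toNat + 4⟩,
      ⟨(u.reg .r9).toNat, (u.reg .r9).toNat + 4⟩] u.mem s.mem
  /-- no shadow byte was written -/
  un : ShadowUntouched u.mem s.mem
  /-- the return address -/
  s0 : UInt64.ofNat (s.mem.readLE (u.reg .rsp) 8) = ret
  /-- `push r15` -/
  s1 : UInt64.ofNat (s.mem.readLE (u.reg .rsp - 8) 8) = u.reg .r15
  /-- `push r14` -/
  s2 : UInt64.ofNat (s.mem.readLE (u.reg .rsp - 16) 8) = u.reg .r14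
  /-- `push r13` -/
  s3 : UInt64.ofNat (s.mem.readLE (u.reg .rsp - 24) 8) = u.reg .r13
  /-- `push r12` -/
  s4 : UInt64.ofNat (s.mem.readLE (u.reg .rsp - 32) 8) = u.reg .r12
  /-- `push rbp` -/
  s5 : UInt64.ofNat (s.mem.readLE (u.reg .rsp - 40) 8) = u.reg .rbp
  /-- `push rbx` -/
  s6 : UInt64.ofNat (s.mem.readLE (u.reg .rsp - 48) 8) = u.reg .rbx
  /-- DF = 0 -/
  df : s.flags .df = false
  /-- the six SSE exception masks are set -/
  mx : s.mxcsr &&& 8064 = 8064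
  /-- the bit reader's invariant in the present memory -/
  bits : Bits Blk len s.mem (u.reg .rdi).toNat
  /-- `f->channel_buffer_start = 0` -/
  cbs : s.mem.readLE (u.reg .rdi + 1800) 4 = 0
  /-- `f->channel_buffer_end = 0` -/
  cbe : s.mem.readLE (u.reg .rdi + 1796) 4 = 0
  /-- eax = 0 or 1 -/
  res : s32 (s.reg .rax) = 0 ∨ s32 (s.reg .rax) = 1
  /-- eax = 1: the decoded mode and its window -/
  dm : s32 (s.reg .rax) = 1 → Top.DecodedMode s.mem (u.reg .rdi).toNat (u.reg .rsi).toNat (u.reg .rdx).toNat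
      (u.reg .rcx).toNat (u.reg .r8).toNat (u.reg .r9).toNat

/-! ### PART 3. The segments -/

/-- **Segment 1, 0x113160–0x1131a6** (lines 3152–3156: the prologue, `f->channel_buffer_start = f->channel_buffer_end = 0`, two
check sites): from the function's entry with its precondition to the head `loop1` of the retry loop. -/
def Seg1 (Lay : Layout) (μ : Microarch) (u₀ : State) : Prop :=
  ∀ (others : List Obj) (frames : List (Nat × FrameLayout)) (len : Nat) (A : Arena) (stored room : Int) (ysz : Nat → Nat)
      (u : State) (ret : Word),
    IEntered others frames len A stored room ysz u₀ u ret →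
    ReachVia Lay μ WayInv u (IAt L.vorbis_decode_initial.loop1 (RunBlk A len) len u₀ u ret)

/-- **Segment 2, 0x1131b0–0x1131e9 + 0x1133be** (lines 3158–3163; calls maybe_start_packet, get_bits): ONE ROUND of the retry loop
from its head `loop1`, WITHOUT the drain loop: to the epilogue (`f->eof`, or maybe_start_packet returned 0: eax = 0), or out of the
loop to `at_1131fa` with ebp = 0 (`get_bits(f,1) = 0`), or to the head `loop2` of the drain loop with μ STRICTLY SMALLER
(get_bits' progress clause from `valid_bits = 0`: the packet type bit was read and was 1). -/
def Seg2 (Lay : Layout) (μ : Microarch) (u₀ : State) : Prop :=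
  ∀ (others : List Obj) (frames : List (Nat × FrameLayout)) (len : Nat) (A : Arena) (stored room : Int) (ysz : Nat → Nat)
      (u : State) (ret : Word) (v : State),
    IEntered others frames len A stored room ysz u₀ u ret →
    IAt L.vorbis_decode_initial.loop1 (RunBlk A len) len u₀ u ret v →
    ReachVia Lay μ WayInv v (fun s =>
      IAtEnd (RunBlk A len) len u₀ u ret s ∨
      (IAt L.vorbis_decode_initial.at_1131fa (RunBlk A len) len u₀ u ret s ∧ s.reg .rbp = 0) ∨
      (IAt L.vorbis_decode_initial.loop2 (RunBlk A len) len u₀ u ret s ∧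
        mu s.mem (u.reg .rdi).toNat < mu v.mem (u.reg .rdi).toNat))

/-- **Segment 3, 0x1131eb–0x1131f8** (line 3165 `while (EOP != get8_packet(f));` and `goto retry`): ONE ROUND of the drain loop from
its head `loop2`: back to `loop2` with μ strictly smaller (a byte was returned: get8_packet's `strict` clause), or (EOP) to the head
`loop1` of the retry loop with μ not larger. -/
def Seg3 (Lay : Layout) (μ : Microarch) (u₀ : State) : Prop :=
  ∀ (others : List Obj) (frames : List (Nat × FrameLayout)) (len : Nat) (A : Arena) (stored room : Int) (ysz : Nat → Nat)
      (u : State) (ret : Word) (v : State),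
    IEntered others frames len A stored room ysz u₀ u ret →
    IAt L.vorbis_decode_initial.loop2 (RunBlk A len) len u₀ u ret v →
    ReachVia Lay μ WayInv v (fun s =>
      (IAt L.vorbis_decode_initial.loop1 (RunBlk A len) len u₀ u ret s ∧
        mu s.mem (u.reg .rdi).toNat ≤ mu v.mem (u.reg .rdi).toNat) ∨
      (IAt L.vorbis_decode_initial.loop2 (RunBlk A len) len u₀ u ret s ∧
        mu s.mem (u.reg .rdi).toNat < mu v.mem (u.reg .rdi).toNat))

/-- **Segment 4, 0x1131fa–0x113219** (line 3172 `get_bits(f, ilog(f->mode_count-1))`; calls ilog, get_bits; one check site): from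
the exit of the retry loop to the return `cut7` of get_bits: ebp = 0 still, and the result `i` in rax is below `2 ^ 31` (ilog
returns at most 31 for EVERY `int`: `ilogVal_le_of_lt`; SH7 through `DecodeInv.tables_kept`). -/
def Seg4 (Lay : Layout) (μ : Microarch) (u₀ : State) : Prop :=
  ∀ (others : List Obj) (frames : List (Nat × FrameLayout)) (len : Nat) (A : Arena) (stored room : Int) (ysz : Nat → Nat)
      (u : State) (ret : Word) (v : State),
    IEntered others frames len A stored room ysz u₀ u ret →
    IAt L.vorbis_decode_initial.at_1131fa (RunBlk A len) len u₀ u ret v → v.reg .rbp = 0 →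
    ReachVia Lay μ WayInv v (fun s =>
      IAt L.vorbis_decode_initial.cut7 (RunBlk A len) len u₀ u ret s ∧ s.reg .rbp = 0 ∧ (s.reg .rax).toNat < 2 ^ 31)

/-- **Segment 5, 0x11321e–0x113260 + 0x1133d2–0x1133d8** (lines 3173–3177: the dead arm `i == EOP`, the exit `i >= f->mode_count` —
eax = ebp = 0 —, the checked store `*mode = i`, `m = f->mode_config + i`, the check of `m->blockflag`; three check sites): to the
epilogue, or to `ret12` = 0x113265 with the mode `i` (`i < mode_count ≤ 64`: MD1). -/
def Seg5 (Lay : Layout) (μ : Microarch) (u₀ : State) : Prop :=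
  ∀ (others : List Obj) (frames : List (Nat × FrameLayout)) (len : Nat) (A : Arena) (stored room : Int) (ysz : Nat → Nat)
      (u : State) (ret : Word) (v : State),
    IEntered others frames len A stored room ysz u₀ u ret →
    IAt L.vorbis_decode_initial.cut7 (RunBlk A len) len u₀ u ret v → v.reg .rbp = 0 → (v.reg .rax).toNat < 2 ^ 31 →
    ReachVia Lay μ WayInv v (fun s =>
      IAtEnd (RunBlk A len) len u₀ u ret s ∨
      ∃ i, IAtM L.vorbis_decode_initial.ret12 (RunBlk A len) len u₀ u ret i s)

/-- **Segment 6, 0x113265–0x11327e + 0x1132df–0x113312** (lines 3177–3185: `if (m->blockflag)`: `n = f->blocksize_1`, `prev =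
get_bits(f,1)`, `next = get_bits(f,1)`; else `prev = next = 0`, `n = f->blocksize_0`; two check sites, two calls of get_bits): from
`ret12` to the join `at_113282` with `bf`, `n`. -/
def Seg6 (Lay : Layout) (μ : Microarch) (u₀ : State) : Prop :=
  ∀ (others : List Obj) (frames : List (Nat × FrameLayout)) (len : Nat) (A : Arena) (stored room : Int) (ysz : Nat → Nat)
      (u : State) (ret : Word) (i : Nat) (v : State),
    IEntered others frames len A stored room ysz u₀ u ret →
    IAtM L.vorbis_decode_initial.ret12 (RunBlk A len) len u₀ u ret i v →
    ReachVia Lay μ WayInv v (fun s => ∃ bf n, IAtWin (RunBlk A len) len u₀ u ret i bf n s)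

/-- **Segment 7, 0x113282–0x1132dd + 0x113317–0x113333** (lines 3188–3195: `window_center = n >> 1`, the two stores of the left half
of the window; six check sites, no contract call): from the join `at_113282` to the join `at_113337`. -/
def Seg7 (Lay : Layout) (μ : Microarch) (u₀ : State) : Prop :=
  ∀ (others : List Obj) (frames : List (Nat × FrameLayout)) (len : Nat) (A : Arena) (stored room : Int) (ysz : Nat → Nat)
      (u : State) (ret : Word) (i bf n : Nat) (v : State),
    IEntered others frames len A stored room ysz u₀ u ret →
    IAtWin (RunBlk A len) len u₀ u ret i bf n v →
    ReachVia Lay μ WayInv v (IAtRight (RunBlk A len) len u₀ u ret i bf n)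

/-- **Segment 8, 0x113337–0x1133bc** (lines 3196–3204: the two stores of the right half of the window, `return TRUE`; five check
sites on each arm, no contract call): from the join `at_113337` to the epilogue with eax = 1 and `Top.DecodedMode` (the five
out-objects are read back through `Top.Apart4`; `*f` through `IFrame.same`). -/
def Seg8 (Lay : Layout) (μ : Microarch) (u₀ : State) : Prop :=
  ∀ (others : List Obj) (frames : List (Nat × FrameLayout)) (len : Nat) (A : Arena) (stored room : Int) (ysz : Nat → Nat)
      (u : State) (ret : Word) (i bf n : Nat) (v : State),
    IEntered others frames len A stored room ysz u₀ u ret →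
    IAtRight (RunBlk A len) len u₀ u ret i bf n v →
    ReachVia Lay μ WayInv v (IAtEnd (RunBlk A len) len u₀ u ret)

/-- **Segment 9, 0x1133c3–0x1133d1** (the epilogue: `add rsp, 28H`, six pops, `ret`): from `IAtEnd` to the state after the `ret`: the
contract's `Returned` (`di_post_ok`). -/
def Seg9 (Lay : Layout) (μ : Microarch) (u₀ : State) : Prop :=
  ∀ (others : List Obj) (frames : List (Nat × FrameLayout)) (len : Nat) (A : Arena) (stored room : Int) (ysz : Nat → Nat)
      (u : State) (ret : Word) (v : State),
    IEntered others frames len A stored room ysz u₀ u ret →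
    IAtEnd (RunBlk A len) len u₀ u ret v →
    ReachVia Lay μ WayInv v (Returned (conv u₀) (vorbis_decode_initial.spec others frames len A stored room ysz) u ret)

end Vorbis.Spec.vorbis_decode_initial
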